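-- pv_equiv track=rewrite | github.com/0h328/TIL | 0817/justin/3143_가장빠른문자열타이핑/s2.py | solve
-- ===== SOURCE A (Python) =====
-- def solve(target, pattern):
--     typo = cnt = 0
--     T = len(target)
--     P = len(pattern)
--     while typo < T:                         # 빠른 글자가 전체 글자수를 넘지 않을 때까지 반복
--         if target[typo:typo+P] == pattern:  # target에서 pattern을 찾으면
--             typo += P                       # typo를 P만큼 추가 (일치하는 문자 다음부터 확인하기 위함)
--             cnt += 1                        # 타이핑 1회 cnt
--         else:                               # 못찾으면
--             typo += 1                       # 한칸 앞으로 가서 다음 문자 확인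
--             cnt += 1                        # 타이핑 1회 cnt
--     return cnt
-- ===== SOURCE B (Python) =====
-- def solve(target, pattern):
--     P = len(pattern)
--     if P == 0:
--         return len(target)
--     m = 0
--     i = 0
--     while True:
--         j = target.find(pattern, i)
--         if j == -1:
--             break
--         m += 1
--         i = j + P
--     return len(target) - m * (P - 1)
-- ===== Notes on version B (the rewrite author's own statement) =====
-- stated objective: faster
-- what changed: Instead of comparing a fresh P-character slice at every position of target, B jumps between matches with str.find (greedy next occurrence) and returns the closed form len(target) - matches*(P-1).
-- outside the precondition, e.g. on solve('a', ''): A does not finish within the time limit, B returns 1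
import Mathlib
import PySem

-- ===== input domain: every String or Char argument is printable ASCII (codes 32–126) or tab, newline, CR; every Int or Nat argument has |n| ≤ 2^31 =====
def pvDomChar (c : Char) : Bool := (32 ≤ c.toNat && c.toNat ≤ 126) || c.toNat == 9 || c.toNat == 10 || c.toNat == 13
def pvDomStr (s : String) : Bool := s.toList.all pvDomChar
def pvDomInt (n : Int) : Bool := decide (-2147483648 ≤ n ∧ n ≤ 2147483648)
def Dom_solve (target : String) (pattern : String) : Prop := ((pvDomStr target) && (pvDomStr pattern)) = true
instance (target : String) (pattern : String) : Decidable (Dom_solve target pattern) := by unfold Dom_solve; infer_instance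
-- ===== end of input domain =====

-- B replaces A's position-by-position slice comparison by a find-based jump to the next match
-- and a closed-form count (len(target) - matches*(P-1)); objective: faster (C-level substring search).

-- ===== PORT A =====
-- A's while loop: fuel = len(target) suffices because each iteration advances typo by ≥ 1
-- whenever pattern ≠ "" (pattern = "" with nonempty target loops forever in Python; excluded by Pre_).
def solveLoopA (t p : List Char) : Nat → Nat → Nat → Nat
  | 0, _, cnt => cnt
  | f + 1, typo, cnt =>
    if typo < t.length then
      if PySem.Chars.slice t (some (typo : Int)) (some ((typo : Int) + (p.length : Int))) = p then
        solveLoopA t p f (typo + p.length) (cnt + 1)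
      else
        solveLoopA t p f (typo + 1) (cnt + 1)
    else cnt

def solve (target : String) (pattern : String) : Int :=
  ((solveLoopA target.toList pattern.toList target.toList.length 0 0 : Nat) : Int)

-- ===== PORT B =====
-- B's while True loop: each found match advances i by ≥ 1 (pattern ≠ ""), so len(target)+1 fuel suffices.
def solveLoopB (t p : List Char) : Nat → Nat → Nat → Nat
  | 0, _, m => m
  | f + 1, i, m =>
    let j := PySem.Chars.findFrom t p (i : Int) none
    if j = -1 then m else solveLoopB t p f (j.toNat + p.length) (m + 1)

def solve_alt (target : String) (pattern : String) : Int :=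
  let t := target.toList
  let p := pattern.toList
  if p.length = 0 then (t.length : Int)
  else (t.length : Int) - (solveLoopB t p (t.length + 1) 0 0 : Int) * ((p.length : Int) - 1)

-- ===== PRECONDITION & SPEC =====
-- Pre_ excludes only pattern = "" with target ≠ "", on which A's while loop never advances (diverges);
-- on every input A returns on, Pre_ holds.
def Pre_solve (target : String) (pattern : String) : Prop := pattern ≠ "" ∨ target = ""
instance (target : String) (pattern : String) : Decidable (Pre_solve target pattern) := by unfold Pre_solve; infer_instance
def pvWitness_solve : String × String := ("abcaabc", "abc")
def Spec_solve (target : String) (pattern : String) (out : Int) : Prop := out = solve_alt target pattern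
instance (target : String) (pattern : String) (out : Int) : Decidable (Spec_solve target pattern out) := by unfold Spec_solve; infer_instance

-- ===== CLAIM (what is proved, stated in full; the proofs are below) =====
def Claim_equal_solve : Prop := ∀ (target : String) (pattern : String), Dom_solve target pattern → Pre_solve target pattern → Spec_solve target pattern (solve target pattern)

-- ===== LEMMAS AND PROOFS =====

-- reference count of A's loop iterations starting at typo
def pvSteps (t p : List Char) (typo : Nat) : Nat :=
  if h : typo < t.length ∧ p ≠ [] then
    (if (t.drop typo).take p.length = p then pvSteps t p (typo + p.length) else pvSteps t p (typo + 1)) + 1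
  else 0
termination_by t.length - typo
decreasing_by
  · have : 0 < p.length := List.length_pos_of_ne_nil h.2
    omega
  · omega

-- reference count of greedy non-overlapping matches starting at i
def pvMatches (t p : List Char) (i : Nat) : Nat :=
  if h : p ≠ [] ∧ i ≤ t.length ∧ PySem.Chars.findFrom t p (i : Int) none ≠ -1 then
    pvMatches t p ((PySem.Chars.findFrom t p (i : Int) none).toNat + p.length) + 1
  else 0
termination_by t.length - i
decreasing_by
  obtain ⟨hp, hi, hf⟩ := h
  obtain ⟨h1, h2, -⟩ := PySem.Chars.findFrom_natCast_spec t p i hi hf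
  have hlen := h2.length_le
  have hp1 : 0 < p.length := List.length_pos_of_ne_nil hp
  simp [List.length_drop] at hlen
  omega

theorem loopA_eq_steps (t p : List Char) (hp : p ≠ []) :
    ∀ (f typo cnt : Nat), t.length - typo ≤ f →
      solveLoopA t p f typo cnt = cnt + pvSteps t p typo := by
  intro f
  induction f with
  | zero =>
    intro typo cnt hf
    rw [pvSteps]
    have : ¬ (typo < t.length ∧ p ≠ []) := by omega
    simp [solveLoopA, this]
  | succ f ih =>
    intro typo cnt hf
    by_cases ht : typo < t.length
    · have hslice : PySem.Chars.slice t (some (typo : Int)) (some ((typo : Int) + (p.length : Int))) =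
          (t.drop typo).take p.length := by
        simp [PySem.Chars.slice_eq_listSlice, PySem.List.slice_natCast_add]
      rw [pvSteps, dif_pos (And.intro ht hp)]
      have hp1 : 0 < p.length := List.length_pos_of_ne_nil hp
      by_cases hc : (t.drop typo).take p.length = p
      · rw [if_pos hc]
        show (if typo < t.length then _ else _) = _
        rw [if_pos ht, if_pos (hslice.trans hc), ih (typo + p.length) (cnt + 1) (by omega)]
        omega
      · rw [if_neg hc]
        show (if typo < t.length then _ else _) = _
        rw [if_pos ht, if_neg (fun h => hc (hslice ▸ h)), ih (typo + 1) (cnt + 1) (by omega)]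
        omega
    · rw [pvSteps]
      simp [solveLoopA, ht]

theorem loopB_eq_matches (t p : List Char) (hp : p ≠ []) :
    ∀ (f i m : Nat), i ≤ t.length → t.length - i < f →
      solveLoopB t p f i m = m + pvMatches t p i := by
  intro f
  induction f with
  | zero => intro i m hi hf; omega
  | succ f ih =>
    intro i m hi hf
    by_cases hj : PySem.Chars.findFrom t p (i : Int) none = -1
    · rw [pvMatches]
      simp [solveLoopB, hj]
    · obtain ⟨h1, h2, -⟩ := PySem.Chars.findFrom_natCast_spec t p i hi hj
      have hlen := h2.length_le
      have hp1 : 0 < p.length := List.length_pos_of_ne_nil hp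
      simp only [List.length_drop] at hlen
      rw [pvMatches]
      simp only [solveLoopB, hj, if_false, dif_pos (And.intro hp (And.intro hi hj))]
      rw [ih ((PySem.Chars.findFrom t p (i : Int) none).toNat + p.length) (m + 1) (by omega) (by omega)]
      omega

-- when pattern occurs at i, find(pattern, i) is i itself
theorem findFrom_self (t p : List Char) (i : Nat) (hi : i ≤ t.length)
    (hpre : p <+: t.drop i) : PySem.Chars.findFrom t p (i : Int) none = (i : Int) := by
  have hne : PySem.Chars.findFrom t p (i : Int) none ≠ -1 := by
    intro h
    rw [PySem.Chars.findFrom_natCast_eq_neg_one_iff t p i hi] at h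
    exact h hpre.isInfix
  obtain ⟨h1, h2, h3⟩ := PySem.Chars.findFrom_natCast_spec t p i hi hne
  have hni : ¬ i < (PySem.Chars.findFrom t p (i : Int) none).toNat :=
    fun hlt => h3 i le_rfl hlt hpre
  omega

-- when pattern does not occur at i, find(pattern, i) = find(pattern, i+1)
theorem findFrom_step (t p : List Char) (i : Nat) (hi : i < t.length)
    (hnp : ¬ p <+: t.drop i) :
    PySem.Chars.findFrom t p (i : Int) none = PySem.Chars.findFrom t p ((i + 1 : Nat) : Int) none := by
  have hi1 : i + 1 ≤ t.length := hi
  have hdrop : t.drop i = t[i] :: t.drop (i + 1) := List.drop_eq_getElem_cons hi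
  have hinfix : p <:+: t.drop i ↔ p <:+: t.drop (i + 1) := by
    rw [hdrop, List.infix_cons_iff]
    constructor
    · rintro (h | h)
      · exact absurd (hdrop ▸ h) hnp
      · exact h
    · exact Or.inr
  by_cases h2 : PySem.Chars.findFrom t p ((i + 1 : Nat) : Int) none = -1
  · rw [h2, PySem.Chars.findFrom_natCast_eq_neg_one_iff t p i (le_of_lt hi)]
    rw [PySem.Chars.findFrom_natCast_eq_neg_one_iff t p (i + 1) hi1] at h2
    exact fun h => h2 (hinfix.mp h)

  · obtain ⟨h21, h22, h23⟩ := PySem.Chars.findFrom_natCast_spec t p (i + 1) hi1 h2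
    have h1ne : PySem.Chars.findFrom t p (i : Int) none ≠ -1 := by
      intro hno
      rw [PySem.Chars.findFrom_natCast_eq_neg_one_iff t p i (le_of_lt hi)] at hno
      apply hno
      rw [hinfix]
      rw [← PySem.Chars.isIn_iff_infix, ← PySem.Chars.exists_prefix_drop_iff_isIn]
      refine ⟨(PySem.Chars.findFrom t p ((i + 1 : Nat) : Int) none).toNat - (i + 1), ?_⟩
      rw [List.drop_drop]
      have heq : i + 1 + ((PySem.Chars.findFrom t p ((i + 1 : Nat) : Int) none).toNat - (i + 1)) =
          (PySem.Chars.findFrom t p ((i + 1 : Nat) : Int) none).toNat := by omega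
      rw [heq]
      exact h22
    obtain ⟨h11, h12, h13⟩ := PySem.Chars.findFrom_natCast_spec t p i (le_of_lt hi) h1ne
    have hne_i : (PySem.Chars.findFrom t p (i : Int) none).toNat ≠ i := by
      intro h
      exact hnp (h ▸ h12)
    have hlt1 : ¬ (PySem.Chars.findFrom t p (i : Int) none).toNat <
        (PySem.Chars.findFrom t p ((i + 1 : Nat) : Int) none).toNat := by
      intro hlt
      exact h23 _ (by omega) hlt h12
    have hlt2 : ¬ (PySem.Chars.findFrom t p ((i + 1 : Nat) : Int) none).toNat <
        (PySem.Chars.findFrom t p (i : Int) none).toNat := by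
      intro hlt
      exact h13 _ (by omega) hlt h22
    omega

theorem steps_matches (t p : List Char) (hp : p ≠ []) :
    ∀ (typo : Nat), typo ≤ t.length →
      pvSteps t p typo + pvMatches t p typo * (p.length - 1) = t.length - typo := by
  have hP1 : 0 < p.length := List.length_pos_of_ne_nil hp
  suffices H : ∀ (n typo : Nat), typo ≤ t.length → t.length - typo ≤ n →
      pvSteps t p typo + pvMatches t p typo * (p.length - 1) = t.length - typo by
    exact fun typo h => H (t.length) typo h (by omega)
  intro n
  induction n with
  | zero =>
    intro typo hty hn
    have hty' : typo = t.length := by omega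
    subst hty'
    rw [pvSteps, dif_neg (by omega), pvMatches, dif_neg]
    · omega
    · rintro ⟨-, -, hne⟩
      apply hne
      rw [PySem.Chars.findFrom_natCast_eq_neg_one_iff t p t.length le_rfl, List.drop_length,
        List.infix_nil]
      exact hp
  | succ n ih =>
    intro typo hty hn
    by_cases ht : typo < t.length
    · by_cases hc : (t.drop typo).take p.length = p
      · have hpre : p <+: t.drop typo := List.prefix_iff_eq_take.mpr hc.symm
        have hlen := hpre.length_le
        simp only [List.length_drop] at hlen
        have hself := findFrom_self t p typo (by omega) hpre
        rw [pvSteps, dif_pos (And.intro ht hp), if_pos hc,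
          pvMatches, dif_pos (And.intro hp (And.intro (by omega) (by rw [hself]; omega))), hself]
        have htn : ((typo : Int)).toNat = typo := by omega
        rw [htn]
        have hih := ih (typo + p.length) (by omega) (by omega)
        have hmul : (pvMatches t p (typo + p.length) + 1) * (p.length - 1) =
            pvMatches t p (typo + p.length) * (p.length - 1) + (p.length - 1) := by ring
        rw [hmul]
        omega
      · have hnp : ¬ p <+: t.drop typo := fun h => hc (List.prefix_iff_eq_take.mp h).symm
        have hstep := findFrom_step t p typo ht hnp
        have e1 : pvMatches t p typo = pvMatches t p (typo + 1) := by
          by_cases h2 : PySem.Chars.findFrom t p ((typo + 1 : Nat) : Int) none = -1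
          · rw [pvMatches, dif_neg (by rintro ⟨-, -, hne⟩; exact hne (hstep.trans h2)),
              pvMatches, dif_neg (by rintro ⟨-, -, hne⟩; exact hne h2)]
          · conv_lhs => rw [pvMatches]
            rw [dif_pos (And.intro hp (And.intro (by omega : typo ≤ t.length)
              (by rw [hstep]; exact h2))), hstep]
            conv_rhs => rw [pvMatches]
            rw [dif_pos (And.intro hp (And.intro (by omega : typo + 1 ≤ t.length) h2))]
        rw [pvSteps, dif_pos (And.intro ht hp), if_neg hc, e1]
        have hih := ih (typo + 1) (by omega) (by omega)
        omega
    · have hty' : typo = t.length := by omega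
      subst hty'
      rw [pvSteps, dif_neg (by omega), pvMatches, dif_neg]
      · omega
      · rintro ⟨-, -, hne⟩
        apply hne
        rw [PySem.Chars.findFrom_natCast_eq_neg_one_iff t p t.length le_rfl, List.drop_length,
          List.infix_nil]
        exact hp

-- ===== VERDICT (by name: the statement is the Claim_ definition above) =====
theorem solve_spec : Claim_equal_solve := by
  intro target pattern _ hpre
  unfold Spec_solve solve solve_alt
  by_cases hp : pattern.toList = []
  · have htgt : target = "" := by
      rcases hpre with h | h
      · exact absurd (String.toList_eq_nil_iff.mp hp) h
      · exact h
    subst htgt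
    simp [solveLoopA, hp]
  · have hP1 : 0 < pattern.toList.length := List.length_pos_of_ne_nil hp
    rw [if_neg (by omega)]
    rw [loopA_eq_steps target.toList pattern.toList hp target.toList.length 0 0 (by omega)]
    rw [loopB_eq_matches target.toList pattern.toList hp (target.toList.length + 1) 0 0
      (by omega) (by omega)]
    simp only [Nat.zero_add]
    have hc := steps_matches target.toList pattern.toList hp 0 (by omega)
    have hcast : ((pvMatches target.toList pattern.toList 0 * (pattern.toList.length - 1) : Nat) : Int) =
        (pvMatches target.toList pattern.toList 0 : Int) * ((pattern.toList.length : Int) - 1) := by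
      push_cast [Nat.cast_sub hP1]
      ring
    omega
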